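/- GENERATED by farm/mkstatement.py from design/units.tsv (unit `imdct_step3_inner_r_loop.1`) and the assertions of Vorbis/Spec/Mdct.lean — do not edit.
   THE STATEMENT of the proof unit `imdct_step3_inner_r_loop.1`: segment 1 of `imdct_step3_inner_r_loop` (16 instructions; entries 0x105740;
   exits 0x105af9; ranges 0x105740-0x10576a)
   takes each of its entry assertions to one of its exit assertions (`Vorbis.Spec.imdct_step3_inner_r_loop.Seg1`), given the contracts of its callees.
   What the names mean: Vorbis/Spec/Basic.lean (the shared hypotheses), Vorbis/Spec/Mdct.lean (the assertions). The theorem to prove: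
   `theorem imdct_step3_inner_r_loop_1_ok : Vorbis.Spec.imdct_step3_inner_r_loop_1.Statement`. -/
import Vorbis.Spec.Mdct
namespace Vorbis.Spec.imdct_step3_inner_r_loop_1
open X86 X86.User Asan

/-- The statement of unit `imdct_step3_inner_r_loop.1`. -/
def Statement : Prop :=
  ∀ (Lay : Layout) (_hLay : Lay.hi = 0x1000000) (μ : Microarch) (_hμ : UserX.MicroOK μ) (u₀ : State)
    (_hcode : HasCodeNat Lay u₀ Vorbis.L.imdct_step3_inner_r_loop.entry Vorbis.Code.code_imdct_step3_inner_r_loop.nat Vorbis.L.imdct_step3_inner_r_loop.size),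
    Vorbis.Spec.imdct_step3_inner_r_loop.Seg1 Lay μ u₀

end Vorbis.Spec.imdct_step3_inner_r_loop_1
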